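-- pv_equiv track=rewrite | github.com/elvis-gene/coding-practice | binarysearch.com/Minimum_String.py | solve
-- ===== SOURCE A (Python) =====
-- def solve(s, t):
--
--     s_dict = {}
--     t_dict = {}
--
--     for x, y in zip(s, t):
--         s_dict[x] = s_dict.get(x, 0) + 1
--         t_dict[y] = t_dict.get(y, 0) + 1
--
--     count = 0
--     for key in t_dict.keys():
--         if t_dict[key] > s_dict.get(key,0):
--             count += t_dict[key] - s_dict.get(key,0)
--
--     return count
-- ===== SOURCE B (Python) =====
-- def solve(s, t):
--     n = min(len(s), len(t))
--     sp = sorted(s[:n])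
--     tp = sorted(t[:n])
--     i = j = matched = 0
--     while i < n and j < n:
--         if sp[i] == tp[j]:
--             matched += 1
--             i += 1
--             j += 1
--         elif sp[i] < tp[j]:
--             i += 1
--         else:
--             j += 1
--     return n - matched
-- ===== Notes on version B (the rewrite author's own statement) =====
-- stated objective: alternative
-- what changed: Replaces the frequency-dict building pass and the per-key excess-comparison loop by sorting both truncated prefixes and counting matched characters with a two-pointer merge, returning n minus the number of matches.
import Mathlib
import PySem

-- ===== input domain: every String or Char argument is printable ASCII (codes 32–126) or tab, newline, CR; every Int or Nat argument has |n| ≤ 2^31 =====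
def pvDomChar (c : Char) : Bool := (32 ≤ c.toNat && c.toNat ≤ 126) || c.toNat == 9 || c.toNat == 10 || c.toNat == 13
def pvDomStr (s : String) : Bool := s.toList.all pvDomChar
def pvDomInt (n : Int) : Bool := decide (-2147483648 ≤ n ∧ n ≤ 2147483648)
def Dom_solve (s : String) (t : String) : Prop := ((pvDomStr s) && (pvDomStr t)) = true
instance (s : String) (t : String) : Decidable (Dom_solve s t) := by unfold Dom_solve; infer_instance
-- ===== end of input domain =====

-- B sorts both common-length prefixes and counts matched characters with a two-pointer merge,
-- returning n - matched, replacing A's two counting dicts and per-key comparison loop (alternative).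


-- ===== PORT A =====
-- one loop over zip(s, t) updating both dicts; then the per-key comparison loop.
-- t_dict[key] is ported as getD key 0: every key iterated over is present in t_dict, so this is exact.
def solve (s : String) (t : String) : Int :=
  let dicts := (List.zip s.toList t.toList).foldl
    (fun (st : PySem.Dict Char Int × PySem.Dict Char Int) xy =>
      (st.1.insert xy.1 (st.1.getD xy.1 0 + 1), st.2.insert xy.2 (st.2.getD xy.2 0 + 1)))
    (PySem.Dict.empty, PySem.Dict.empty)
  let s_dict := dicts.1
  let t_dict := dicts.2
  t_dict.keys.foldl
    (fun count key =>
      if t_dict.getD key 0 > s_dict.getD key 0 then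
        count + (t_dict.getD key 0 - s_dict.getD key 0)
      else count) 0

-- ===== PORT B =====
-- the two-pointer while loop over the two sorted arrays, transcribed as the structural
-- recursion that advances the same pointers (advancing i/j = dropping the corresponding head).
def mergeMatched : List Char → List Char → Int
  | [], _ => 0
  | _ :: _, [] => 0
  | a :: as, b :: bs =>
      if a = b then mergeMatched as bs + 1
      else if a < b then mergeMatched as (b :: bs)
      else mergeMatched (a :: as) bs
termination_by xs ys => xs.length + ys.length

def solve_alt (s : String) (t : String) : Int :=
  let n : Int := min (PySem.Str.len s) (PySem.Str.len t)
  let sp := PySem.List.sorted (PySem.List.slice s.toList none (some n)) (fun c => c) false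
  let tp := PySem.List.sorted (PySem.List.slice t.toList none (some n)) (fun c => c) false
  n - mergeMatched sp tp

-- ===== PRECONDITION & SPEC =====
def Spec_solve (s : String) (t : String) (out : Int) : Prop := out = solve_alt s t
instance (s : String) (t : String) (out : Int) : Decidable (Spec_solve s t out) := by unfold Spec_solve; infer_instance

-- ===== CLAIM (what is proved, stated in full; the proofs are below) =====
def Claim_equal_solve : Prop := ∀ (s : String) (t : String), Dom_solve s t → Spec_solve s t (solve s t)

-- ===== LEMMAS AND PROOFS =====

theorem map_fst_zip_take {α β : Type} (l1 : List α) (l2 : List β) :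
    (List.zip l1 l2).map Prod.fst = l1.take l2.length := by
  induction l1 generalizing l2 with
  | nil => simp
  | cons a l ih => cases l2 <;> simp [ih]

theorem map_snd_zip_take {α β : Type} (l1 : List α) (l2 : List β) :
    (List.zip l1 l2).map Prod.snd = l2.take l1.length := by
  induction l2 generalizing l1 with
  | nil => simp
  | cons a l ih => cases l1 <;> simp [ih]

theorem int_sum_map_cast (D : List Char) (f : Char → Nat) :
    (D.map fun c => ((f c : Nat) : Int)).sum = (((D.map f).sum : Nat) : Int) := by
  induction D with
  | nil => simp
  | cons c D ih => simp [ih]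

theorem mergeMatched_eq_card_inter (xs ys : List Char)
    (hx : xs.Pairwise (· ≤ ·)) (hy : ys.Pairwise (· ≤ ·)) :
    mergeMatched xs ys = (((xs : Multiset Char) ∩ (ys : Multiset Char)).card : Int) := by
  induction xs, ys using mergeMatched.induct with
  | case1 ys => simp [mergeMatched]
  | case2 a as => simp [mergeMatched]
  | case3 as a bs ih =>
      have h : ((a :: as : List Char) : Multiset Char) ∩ ((a :: bs : List Char) : Multiset Char)
          = a ::ₘ (((as : Multiset Char)) ∩ ((bs : Multiset Char))) := by
        apply Multiset.ext.mpr
        intro c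
        rw [← Multiset.cons_coe, ← Multiset.cons_coe, Multiset.count_inter,
            Multiset.count_cons, Multiset.count_cons, Multiset.count_cons,
            Multiset.count_inter]
        split_ifs <;> omega
      rw [mergeMatched, if_pos rfl, h, Multiset.card_cons,
          ih (List.Pairwise.sublist (List.sublist_cons_self a as) hx)
             (List.Pairwise.sublist (List.sublist_cons_self a bs) hy)]
      push_cast; ring
  | case4 a as b bs hne hlt ih =>
      have hnotin : a ∉ (b :: bs : List Char) := by
        intro hmem
        rcases List.mem_cons.mp hmem with h | h
        · exact hne h
        · have := (List.pairwise_cons.mp hy).1 a h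
          exact absurd (lt_of_lt_of_le hlt this) (lt_irrefl a)
      have h : ((a :: as : List Char) : Multiset Char) ∩ ((b :: bs : List Char) : Multiset Char)
          = ((as : Multiset Char)) ∩ ((b :: bs : List Char) : Multiset Char) := by
        apply Multiset.ext.mpr
        intro c
        rw [← Multiset.cons_coe (a := a), Multiset.count_inter, Multiset.count_cons,
            Multiset.count_inter]
        have hc0 : Multiset.count a ((b :: bs : List Char) : Multiset Char) = 0 := by
          rw [Multiset.count_eq_zero]
          simpa using hnotin
        by_cases hc : c = a
        · subst hc; rw [hc0]; omega
        · simp [hc]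
      rw [mergeMatched, if_neg hne, if_pos hlt, h]
      exact ih (List.Pairwise.sublist (List.sublist_cons_self a as) hx) hy
  | case5 a as b bs hne hnlt ih =>
      have hba : b < a := lt_of_le_of_ne (le_of_not_gt (by simpa using hnlt)) (fun h => hne h.symm)
      have hnotin : b ∉ (a :: as : List Char) := by
        intro hmem
        rcases List.mem_cons.mp hmem with h | h
        · exact hne h.symm
        · have := (List.pairwise_cons.mp hx).1 b h
          exact absurd (lt_of_lt_of_le hba this) (lt_irrefl b)
      have h : ((a :: as : List Char) : Multiset Char) ∩ ((b :: bs : List Char) : Multiset Char)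
          = ((a :: as : List Char) : Multiset Char) ∩ ((bs : Multiset Char)) := by
        apply Multiset.ext.mpr
        intro c
        rw [← Multiset.cons_coe (a := b), Multiset.count_inter, Multiset.count_cons,
            Multiset.count_inter]
        have hc0 : Multiset.count b ((a :: as : List Char) : Multiset Char) = 0 := by
          rw [Multiset.count_eq_zero]
          simpa using hnotin
        by_cases hc : c = b
        · subst hc; rw [hc0]; omega
        · simp [hc]
      rw [mergeMatched, if_neg hne, if_neg hnlt, h]
      exact ih hx (List.Pairwise.sublist (List.sublist_cons_self b bs) hy)

theorem sum_counts_eq_card (D : List Char) : ∀ (m : Multiset Char), D.Nodup →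
    (∀ a ∈ m, a ∈ D) → (D.map fun c => m.count c).sum = m.card := by
  induction D with
  | nil =>
      intro m _ hcov
      have : m = 0 := Multiset.eq_zero_of_forall_notMem (fun a ha => by simpa using hcov a ha)
      simp [this]
  | cons c D ih =>
      intro m hD hcov
      have hcD : c ∉ D := (List.nodup_cons.mp hD).1
      have hstep : (D.map fun d => m.count d).sum
          = (D.map fun d => (m.filter (fun a => ¬ a = c)).count d).sum := by
        apply congrArg
        apply List.map_congr_left
        intro d hd
        have hdc : d ≠ c := fun h => hcD (h ▸ hd)
        rw [Multiset.count_filter]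
        simp [hdc]
      have h1 : m.count c = (m.filter fun a => a = c).card := by
        rw [Multiset.count_eq_card_filter_eq]
        congr 1
        exact Multiset.filter_congr (fun x _ => eq_comm)
      have hsplit := congrArg Multiset.card (Multiset.filter_add_not (fun a => a = c) m)
      rw [Multiset.card_add] at hsplit
      simp only [List.map_cons, List.sum_cons, hstep]
      rw [ih (m.filter fun a => ¬ a = c) (List.nodup_cons.mp hD).2
            (fun a ha => by
              rcases List.mem_cons.mp (hcov a (Multiset.mem_of_mem_filter ha)) with h | h
              · exact absurd h (Multiset.of_mem_filter (p := fun a => ¬ a = c) ha)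
              · exact h)]
      omega

-- ===== VERDICT (by name: the statement is the Claim_ definition above) =====
theorem solve_spec : Claim_equal_solve := by
  intro s t _
  unfold Spec_solve solve solve_alt
  dsimp only
  rw [PySem.List.foldl_prod_mk
        (f := fun (d : PySem.Dict Char Int) (xy : Char × Char) => d.insert xy.1 (d.getD xy.1 0 + 1))
        (g := fun (d : PySem.Dict Char Int) (xy : Char × Char) => d.insert xy.2 (d.getD xy.2 0 + 1))]
  have h1 : List.foldl (fun (d : PySem.Dict Char Int) (xy : Char × Char) =>
        d.insert xy.1 (d.getD xy.1 0 + 1)) PySem.Dict.empty (s.toList.zip t.toList)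
      = PySem.Dict.counter ((s.toList.zip t.toList).map Prod.fst) := by
    rw [← PySem.Dict.foldl_insert_getD_add_one_eq_counter, List.foldl_map]
  have h2 : List.foldl (fun (d : PySem.Dict Char Int) (xy : Char × Char) =>
        d.insert xy.2 (d.getD xy.2 0 + 1)) PySem.Dict.empty (s.toList.zip t.toList)
      = PySem.Dict.counter ((s.toList.zip t.toList).map Prod.snd) := by
    rw [← PySem.Dict.foldl_insert_getD_add_one_eq_counter, List.foldl_map]
  rw [h1, h2]
  rw [map_fst_zip_take, map_snd_zip_take]
  set sp := s.toList.take t.toList.length with hsp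
  set tp := t.toList.take s.toList.length with htp
  simp only [PySem.Dict.keys_counter, PySem.Dict.getD_counter]
  rw [PySem.List.foldl_congr_mem _ _
        (fun count key => count + max ((tp.count key : Int) - (sp.count key : Int)) 0) _
        (by intro acc x _; dsimp only; split_ifs with h <;> omega)]
  rw [PySem.List.foldl_add, zero_add]
  -- left side: the excess sum is the size of the multiset difference tp - sp
  have hmapeq : ((PySem.Set.ofList tp).map fun key =>
        max ((tp.count key : Int) - (sp.count key : Int)) 0)
      = ((PySem.Set.ofList tp).map fun key =>
        ((Multiset.count key ((tp : Multiset Char) - (sp : Multiset Char)) : Nat) : Int)) := by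
    apply List.map_congr_left
    intro c _
    rw [Multiset.count_sub, Multiset.coe_count, Multiset.coe_count]
    omega
  rw [hmapeq, int_sum_map_cast, sum_counts_eq_card _ _
        (by rw [← PySem.List.dedup_eq_ofList]; exact PySem.List.nodup_dedup tp)
        (fun a ha => by
          rw [← PySem.List.dedup_eq_ofList, PySem.List.mem_dedup, ← Multiset.mem_coe]
          exact Multiset.mem_of_le (Multiset.sub_le_self _ _) ha)]
  -- right side: the merge over the sorted prefixes is the size of the intersection
  have hn : (0 : Int) ≤ min (PySem.Str.len s) (PySem.Str.len t) := by
    simp [PySem.Str.len_eq]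
  rw [PySem.List.slice_to _ hn, PySem.List.slice_to _ hn]
  have hnat : (min (PySem.Str.len s) (PySem.Str.len t)).toNat
      = min s.toList.length t.toList.length := by
    simp [PySem.Str.len_eq]; omega
  rw [hnat,
      show s.toList.take (min s.toList.length t.toList.length) = sp from by
        rw [hsp, List.take_eq_take_iff]; omega,
      show t.toList.take (min s.toList.length t.toList.length) = tp from by
        rw [htp, List.take_eq_take_iff]; omega]
  rw [mergeMatched_eq_card_inter _ _
        (PySem.List.sorted_pairwise sp (fun c => c))
        (PySem.List.sorted_pairwise tp (fun c => c))]
  have hperm_s : ((PySem.List.sorted sp (fun c => c) false : List Char) : Multiset Char)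
      = (sp : Multiset Char) := Quot.sound (PySem.List.sorted_perm sp (fun c => c) false)
  have hperm_t : ((PySem.List.sorted tp (fun c => c) false : List Char) : Multiset Char)
      = (tp : Multiset Char) := Quot.sound (PySem.List.sorted_perm tp (fun c => c) false)
  rw [hperm_s, hperm_t]
  -- arithmetic: card(tp - sp) = n - card(sp ∩ tp)
  have hsub : ((tp : Multiset Char) - (sp : Multiset Char))
      = (tp : Multiset Char) - ((sp : Multiset Char) ∩ (tp : Multiset Char)) := by
    apply Multiset.ext.mpr
    intro c
    rw [Multiset.count_sub, Multiset.count_sub, Multiset.count_inter]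
    omega
  have hcard_sub := Multiset.card_sub (Multiset.inter_le_right (s := (sp : Multiset Char))
    (t := (tp : Multiset Char)))
  have hle := Multiset.card_le_card (Multiset.inter_le_right (s := (sp : Multiset Char))
    (t := (tp : Multiset Char)))
  have hlen : ((tp : Multiset Char)).card = tp.length := by simp
  have hntp : min (PySem.Str.len s) (PySem.Str.len t) = (tp.length : Int) := by
    simp [PySem.Str.len_eq, htp]
  rw [hsub, hcard_sub, hntp]
  omega
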